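-- pv_equiv track=rewrite | github.com/zhaxylykova/LAB2-TSIS4 | s.py | check
-- ===== SOURCE A (Python) =====
-- def check(a, b, string):
--     size = a+b+1
--     sum = 0
--     if size != len(string):
--         return "No"
--     if string[a] != "-":
--         return "No"
--     for i in range(0, a):
--         if string[i] >="0" and string[i] <= "9":
--             sum += 1
--     for i in range(a + 1, size):
--         if string[i] >= "0" and string[i] <="9":
--             sum += 1
--     if(sum != size - 1):
--         return "No"
--     else:
--         return "Yes"
-- ===== SOURCE B (Python) =====
-- import re
--
--
-- def check(a, b, string):
--     if a < 0 or b < 0: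
--         return "No"
--     return "Yes" if re.fullmatch("[0-9]{%d}-[0-9]{%d}" % (a, b), string) else "No"
-- ===== Notes on version B (the rewrite author's own statement) =====
-- stated objective: idiomatic
-- what changed: Replaces the manual length guard, dash index test and two digit-counting loops with a single re.fullmatch call on the dynamically built pattern [0-9]{a}-[0-9]{b} (ported as a deterministic consume-parser), guarded by a plain rejection of negative widths.
-- intended difference: On inputs with a < 0 where len(string) == a+b+1, the wrapped index string[a] is '-' and the digit count (which counts the last -a-1 characters twice) equals len-1, A returns "Yes" via negative-index wraparound; B returns "No", the intended answer for a negative digit-group width. — e.g. on check(-1, 2, "5-"): A returns "Yes", B returns "No"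
import Mathlib
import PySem

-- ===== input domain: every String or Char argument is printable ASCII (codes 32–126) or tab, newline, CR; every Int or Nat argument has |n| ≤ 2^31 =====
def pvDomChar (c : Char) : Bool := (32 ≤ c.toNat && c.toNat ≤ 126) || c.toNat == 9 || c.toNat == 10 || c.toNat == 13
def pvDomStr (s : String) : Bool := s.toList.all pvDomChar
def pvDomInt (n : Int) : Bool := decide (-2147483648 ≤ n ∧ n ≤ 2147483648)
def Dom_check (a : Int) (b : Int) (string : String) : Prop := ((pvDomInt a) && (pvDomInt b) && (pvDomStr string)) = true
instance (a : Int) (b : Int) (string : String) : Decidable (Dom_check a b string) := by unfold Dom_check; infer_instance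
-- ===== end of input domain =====

-- B replaces A's manual length/dash/count loops with one re.fullmatch call on the
-- pattern [0-9]{a}-[0-9]{b} (idiomatic); B rejects negative a/b, where A's answer
-- comes from negative-index wraparound (see D_check).

-- ===== PORT A =====
def check (a : Int) (b : Int) (string : String) : String :=
  let cs := string.toList
  let size := a + b + 1
  if size ≠ (cs.length : Int) then "No"
  else if PySem.List.pyGetD cs a ' ' ≠ '-' then "No"  -- string[a]; index out of range = IndexError, excluded by Pre_check (default ' ' unreachable there)
  else
    let sum : Int := (PySem.List.pyRange 0 a 1).foldl
      (fun s i => if '0' ≤ PySem.List.pyGetD cs i ' ' ∧ PySem.List.pyGetD cs i ' ' ≤ '9' then s + 1 else s) 0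
    let sum := (PySem.List.pyRange (a + 1) size 1).foldl
      (fun s i => if '0' ≤ PySem.List.pyGetD cs i ' ' ∧ PySem.List.pyGetD cs i ' ' ≤ '9' then s + 1 else s) sum
    if sum ≠ size - 1 then "No" else "Yes"

-- ===== PORT B =====
-- the character class [0-9] of the pattern
def reClassDigit (c : Char) : Bool := decide ('0' ≤ c) && decide (c ≤ '9')

-- engine step for '[0-9]{n}': consume exactly n class matches, return the rest
def reConsumeDigits : Nat → List Char → Option (List Char)
  | 0, cs => some cs
  | _ + 1, [] => none
  | n + 1, c :: cs => if reClassDigit c then reConsumeDigits n cs else none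

-- re.fullmatch("[0-9]{a}-[0-9]{b}", s): a digits, a dash, b digits, end of input
def reFullmatchPattern (a b : Nat) (cs : List Char) : Bool :=
  match reConsumeDigits a cs with
  | none => false
  | some [] => false
  | some (c :: rest') =>
    if c = '-' then
      match reConsumeDigits b rest' with
      | some [] => true
      | _ => false
    else false

def check_alt (a : Int) (b : Int) (string : String) : String :=
  if a < 0 ∨ b < 0 then "No"
  else if reFullmatchPattern a.toNat b.toNat string.toList then "Yes" else "No"

-- ===== PRECONDITION & SPEC =====
-- Pre_check excludes exactly the inputs where Python A raises IndexError:
-- len(string) == a+b+1 but index a is outside [-len, len).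
def Pre_check (a : Int) (b : Int) (string : String) : Prop :=
  a + b + 1 = (string.toList.length : Int) →
    (-(string.toList.length : Int) ≤ a ∧ a < (string.toList.length : Int))
instance (a : Int) (b : Int) (string : String) : Decidable (Pre_check a b string) := by
  unfold Pre_check; infer_instance

def pvWitness_check : Int × Int × String := (1, 2, "1-23")

-- On inputs with a < 0 where len(string) == a+b+1, the wrapped index string[a] is '-'
-- and the digit count (counting the last -a-1 characters twice) equals len-1, A returns
-- "Yes" through negative-index wraparound; B returns "No", the intended answer for a
-- negative digit-group width.
def pvDigitCount (l : List Char) : Int := l.countP Char.isDigit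

def D_check (a : Int) (b : Int) (string : String) : Prop :=
  a < 0 ∧ a + b + 1 = (string.toList.length : Int) ∧
  PySem.List.pyGet? string.toList a = some '-' ∧
  pvDigitCount string.toList
    + pvDigitCount (string.toList.drop ((string.toList.length : Int) + a + 1).toNat)
    = (string.toList.length : Int) - 1
instance (a : Int) (b : Int) (string : String) : Decidable (D_check a b string) := by
  unfold D_check; infer_instance

def Spec_check (a : Int) (b : Int) (string : String) (out : String) : Prop :=
  ¬ D_check a b string → out = check_alt a b string
instance (a : Int) (b : Int) (string : String) (out : String) : Decidable (Spec_check a b string out) := by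
  unfold Spec_check; infer_instance

def pvDiffWitness_check : Int × Int × String := (-1, 2, "5-")
def pvDiffWitnessOut_check : String × String := ("Yes", "No")


-- ===== CLAIM (what is proved, stated in full; the proofs are below) =====
def Claim_unchanged_check : Prop := ∀ (a : Int) (b : Int) (string : String),
  Dom_check a b string → Pre_check a b string → Spec_check a b string (check a b string)
def Claim_changed_check : Prop :=
  Dom_check (pvDiffWitness_check.1) (pvDiffWitness_check.2.1) (pvDiffWitness_check.2.2) ∧
  Pre_check (pvDiffWitness_check.1) (pvDiffWitness_check.2.1) (pvDiffWitness_check.2.2) ∧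
  D_check (pvDiffWitness_check.1) (pvDiffWitness_check.2.1) (pvDiffWitness_check.2.2) ∧
  check (pvDiffWitness_check.1) (pvDiffWitness_check.2.1) (pvDiffWitness_check.2.2) = pvDiffWitnessOut_check.1 ∧
  check_alt (pvDiffWitness_check.1) (pvDiffWitness_check.2.1) (pvDiffWitness_check.2.2) = pvDiffWitnessOut_check.2 ∧
  pvDiffWitnessOut_check.1 ≠ pvDiffWitnessOut_check.2
def Claim_exact_check : Prop := ∀ (a : Int) (b : Int) (string : String),
  Dom_check a b string → Pre_check a b string → D_check a b string →
  check a b string ≠ check_alt a b string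
-- ===== LEMMAS AND PROOFS =====

theorem pv_isDigit_eq : Char.isDigit = (fun c => decide ('0' ≤ c) && decide (c ≤ '9')) := by
  funext c
  simp [Char.isDigit, Char.le_def]
  rfl

theorem pv_inrange (cs : List Char) (a : Int) (h : PySem.List.pyGet? cs a = some '-') :
    -(cs.length : Int) ≤ a ∧ a < (cs.length : Int) := by
  by_contra hc
  have hn : PySem.List.pyGet? cs a = none :=
    (PySem.List.pyGet?_eq_none_iff (xs := cs) (i := a)).mpr (by simpa [PySem.Raise.InRange] using hc)
  rw [hn] at h
  simp at h

theorem pv_pyGet_neg_eq (cs : List Char) (a : Int) (hge : -(cs.length : Int) ≤ a) (ha : a < 0) :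
    PySem.List.pyGet? cs a = cs[((cs.length : Int) + a).toNat]? := by
  have hk : 0 < (-a).toNat ∧ (-a).toNat ≤ cs.length := by omega
  have heq := PySem.List.pyGet?_neg_natCast (xs := cs) (k := (-a).toNat) hk.1 hk.2
  have hi : -(((-a).toNat : Int)) = a := by omega
  rw [hi] at heq
  rw [heq]
  congr 1
  have h2 : ((-a).toNat : Int) = -a := Int.toNat_of_nonneg (by omega)
  omega

theorem pv_getD_nonneg (cs : List Char) (d : Char) (i : Int) (h0 : 0 ≤ i) (h1 : i < cs.length) :
    PySem.List.pyGetD cs i d = cs.getD i.toNat d := by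
  have := PySem.List.pyGet?_of_nonneg (xs := cs) (i := i) h0
  simp [PySem.List.pyGetD, this, List.getD_eq_getElem?_getD]

theorem pv_getD_neg (cs : List Char) (d : Char) (i : Int) (h0 : -(cs.length : Int) ≤ i) (h1 : i < 0) :
    PySem.List.pyGetD cs i d = cs.getD ((cs.length : Int) + i).toNat d := by
  have hk : 0 < (-i).toNat ∧ (-i).toNat ≤ cs.length := by omega
  have := PySem.List.pyGet?_neg_natCast (xs := cs) (k := (-i).toNat) hk.1 hk.2
  have hi : -((-i).toNat : Int) = i := by omega
  rw [hi] at this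
  have hidx : cs.length - (-i).toNat = ((cs.length : Int) + i).toNat := by
    have h2 : ((-i).toNat : Int) = -i := Int.toNat_of_nonneg (by omega)
    omega
  simp [PySem.List.pyGetD, this, List.getD_eq_getElem?_getD, hidx]

theorem pv_foldl_count (p : Int → Prop) [DecidablePred p] (l : List Int) (s : Int) :
    l.foldl (fun s i => if p i then s + 1 else s) s = s + l.countP (fun i => decide (p i)) := by
  induction l generalizing s with
  | nil => simp
  | cons x xs ih =>
    simp only [List.foldl_cons, List.countP_cons, ih]
    by_cases h : p x <;> simp [h] <;> try ring

theorem pv_countP_range_getD (dp : Char → Bool) (cs : List Char) (d : Char) :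
    ∀ (n m : Nat), m + n ≤ cs.length →
    (List.range n).countP (fun k => dp (cs.getD (m + k) d)) = ((cs.drop m).take n).countP dp := by
  intro n
  induction n with
  | zero => intro m _; simp
  | succ n ih =>
    intro m h
    have hmn : m + n < cs.length := by omega
    rw [List.range_succ, List.countP_append]
    have h1 : (cs.drop m).take (n + 1) = (cs.drop m).take n ++ [cs[m + n]] := by
      rw [List.take_add_one]
      have : (cs.drop m)[n]? = some cs[m + n] := by
        rw [List.getElem?_drop]
        exact List.getElem?_eq_getElem hmn
      simp [this]
    rw [h1, List.countP_append, ih m (by omega)]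
    simp [List.getD_eq_getElem?_getD, List.getElem?_eq_getElem hmn]

theorem pv_count_seg_nonneg (cs : List Char) (lo hi : Int) (s : Int)
    (h0 : 0 ≤ lo) (h2 : hi ≤ (cs.length : Int)) :
    (PySem.List.pyRange lo hi 1).foldl
      (fun s i => if '0' ≤ PySem.List.pyGetD cs i ' ' ∧ PySem.List.pyGetD cs i ' ' ≤ '9' then s + 1 else s) s
    = s + (((cs.drop lo.toNat).take (hi - lo).toNat).countP
        (fun c => decide ('0' ≤ c) && decide (c ≤ '9')) : Int) := by
  by_cases hlh : hi ≤ lo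
  · rw [PySem.List.pyRange_one_eq_nil hlh]
    have : (hi - lo).toNat = 0 := by omega
    simp [this]
  rw [pv_foldl_count (fun i => '0' ≤ PySem.List.pyGetD cs i ' ' ∧ PySem.List.pyGetD cs i ' ' ≤ '9')]
  congr 1
  rw [PySem.List.pyRange_one, List.countP_map]
  rw [show ((List.range (hi - lo).toNat).countP
      ((fun i => decide ('0' ≤ PySem.List.pyGetD cs i ' ' ∧ PySem.List.pyGetD cs i ' ' ≤ '9')) ∘ (fun k : Nat => lo + k)))
    = (List.range (hi - lo).toNat).countP (fun k => (fun c => decide ('0' ≤ c) && decide (c ≤ '9')) (cs.getD (lo.toNat + k) ' ')) from ?_]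
  · exact congrArg Nat.cast (pv_countP_range_getD (fun c => decide ('0' ≤ c) && decide (c ≤ '9')) cs ' ' (hi - lo).toNat lo.toNat (by omega))
  · apply List.countP_congr
    intro k hk
    simp only [List.mem_range] at hk
    have hlt : lo + (k : Int) < (cs.length : Int) := by omega
    have := pv_getD_nonneg cs ' ' (lo + k) (by omega) (by exact_mod_cast hlt)
    simp only [Function.comp, this]
    have : (lo + (k : Int)).toNat = lo.toNat + k := by omega
    rw [this]
    simp [Bool.decide_and]

theorem pv_count_seg_neg (cs : List Char) (lo : Int) (s : Int)
    (h0 : -(cs.length : Int) ≤ lo) (h1 : lo ≤ 0) :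
    (PySem.List.pyRange lo 0 1).foldl
      (fun s i => if '0' ≤ PySem.List.pyGetD cs i ' ' ∧ PySem.List.pyGetD cs i ' ' ≤ '9' then s + 1 else s) s
    = s + ((cs.drop ((cs.length : Int) + lo).toNat).countP
        (fun c => decide ('0' ≤ c) && decide (c ≤ '9')) : Int) := by
  rw [pv_foldl_count (fun i => '0' ≤ PySem.List.pyGetD cs i ' ' ∧ PySem.List.pyGetD cs i ' ' ≤ '9')]
  congr 1
  rw [PySem.List.pyRange_one, List.countP_map]
  have hnm : ((cs.length : Int) + lo).toNat + (0 - lo).toNat ≤ cs.length := by omega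
  rw [show ((List.range (0 - lo).toNat).countP
      ((fun i => decide ('0' ≤ PySem.List.pyGetD cs i ' ' ∧ PySem.List.pyGetD cs i ' ' ≤ '9')) ∘ (fun k : Nat => lo + k)))
    = (List.range (0 - lo).toNat).countP (fun k => (fun c => decide ('0' ≤ c) && decide (c ≤ '9')) (cs.getD (((cs.length : Int) + lo).toNat + k) ' ')) from ?_]
  · rw [pv_countP_range_getD (fun c => decide ('0' ≤ c) && decide (c ≤ '9')) cs ' ' (0 - lo).toNat ((cs.length : Int) + lo).toNat hnm]
    congr 1
    rw [List.take_of_length_le]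
    simp
    omega
  · apply List.countP_congr
    intro k hk
    simp only [List.mem_range] at hk
    have hik : lo + (k : Int) < 0 := by omega
    have := pv_getD_neg cs ' ' (lo + k) (by omega) hik
    simp only [Function.comp, this]
    have : ((cs.length : Int) + (lo + k)).toNat = ((cs.length : Int) + lo).toNat + k := by omega
    rw [this]
    simp [Bool.decide_and]

theorem pv_reConsume_spec (n : Nat) (cs : List Char) :
    reConsumeDigits n cs = (if n ≤ cs.length ∧ (cs.take n).all reClassDigit then some (cs.drop n) else none) := by
  induction n generalizing cs with
  | zero => simp [reConsumeDigits]
  | succ n ih =>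
    cases cs with
    | nil => simp [reConsumeDigits]
    | cons c rest =>
      simp only [reConsumeDigits, ih rest]
      by_cases hd : reClassDigit c
      · simp [hd]
      · simp [hd]

theorem pv_fullmatch_iff (a b : Nat) (cs : List Char) :
    reFullmatchPattern a b cs = true ↔
      cs.length = a + 1 + b ∧ (cs.take a).all reClassDigit ∧ cs[a]? = some '-' ∧
      (cs.drop (a + 1)).all reClassDigit := by
  unfold reFullmatchPattern
  rw [pv_reConsume_spec]
  by_cases h1 : a ≤ cs.length ∧ (cs.take a).all reClassDigit
  · rw [if_pos h1]
    rcases h1 with ⟨hle, hall⟩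
    have hga : cs[a]? = (cs.drop a)[0]? := by
      rw [List.getElem?_drop]; norm_num
    have htail : cs.drop (a + 1) = (cs.drop a).drop 1 := by
      rw [List.drop_drop]
    cases hdrop : cs.drop a with
    | nil =>
      have hlen : cs.length ≤ a := by
        have := congrArg List.length hdrop
        simp at this
        omega
      rw [hdrop] at hga htail
      simp only [hga, htail]
      simp
    | cons d tail =>
      rw [hdrop] at hga htail
      simp only [List.getElem?_cons_zero] at hga
      simp only [List.drop_one, List.tail_cons] at htail
      have hlen : cs.length = a + 1 + tail.length := by
        have := congrArg List.length hdrop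
        simp at this
        omega
      by_cases hdash : d = '-'
      · subst hdash
        show (if ('-' : Char) = '-' then (match reConsumeDigits b tail with | some [] => true | _ => false) else false) = true ↔ _
        rw [if_pos rfl, pv_reConsume_spec]
        by_cases h2 : b ≤ tail.length ∧ (tail.take b).all reClassDigit
        · rw [if_pos h2]
          constructor
          · intro hdone
            have hnil : tail.drop b = [] := by
              cases hdb : tail.drop b with
              | nil => rfl
              | cons x xs => rw [hdb] at hdone; simp at hdone
            have : tail.length ≤ b := by
              have := congrArg List.length hnil
              simp at this
              omega
            have hlen2 : tail.length = b := le_antisymm this h2.1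
            refine ⟨by omega, hall, hga, ?_⟩
            rw [htail, ← List.take_of_length_le (le_of_eq hlen2)]
            exact h2.2
          · intro ⟨hl, _, _, hta⟩
            have hnil : tail.drop b = [] := List.drop_of_length_le (by omega)
            rw [hnil]
        · rw [if_neg h2]
          constructor
          · intro h; simp at h
          · intro ⟨hl, _, _, hta⟩
            exact absurd ⟨by omega, by rw [List.take_of_length_le (by omega), ← htail]; exact hta⟩ h2
      · show (if d = '-' then (match reConsumeDigits b tail with | some [] => true | _ => false) else false) = true ↔ _
        rw [if_neg hdash]
        constructor
        · intro h; simp at h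
        · intro ⟨_, _, hd2, _⟩
          rw [hga] at hd2
          exact absurd (Option.some.inj hd2) hdash
  · rw [if_neg h1]
    constructor
    · intro h; simp at h
    · intro ⟨hl, hta, _, _⟩
      exact absurd ⟨by omega, hta⟩ h1

theorem pv_check_neg_eval (a b : Int) (string : String)
    (hsz : a + b + 1 = (string.toList.length : Int)) (ha : a < 0)
    (hge : -(string.toList.length : Int) ≤ a) :
    check a b string =
      (if string.toList.getD (((string.toList.length : Int) + a)).toNat ' ' = '-' ∧
          ((string.toList.drop ((string.toList.length : Int) + a + 1).toNat).countP
            (fun c => decide ('0' ≤ c) && decide (c ≤ '9')) : Int)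
          + (string.toList.countP (fun c => decide ('0' ≤ c) && decide (c ≤ '9')) : Int)
          = (string.toList.length : Int) - 1
        then "Yes" else "No") := by
  simp only [check]
  rw [hsz, if_neg (by simp)]
  rw [pv_getD_neg string.toList ' ' a hge ha]
  by_cases hdash : string.toList.getD ((string.toList.length : Int) + a).toNat ' ' = '-'
  · rw [if_neg (not_not_intro hdash)]
    rw [PySem.List.pyRange_one_eq_nil (le_of_lt ha), List.foldl_nil]
    rw [PySem.List.pyRange_one_append (a + 1) 0 (string.toList.length : Int) (by omega) (by omega)]
    rw [List.foldl_append]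
    rw [pv_count_seg_neg string.toList (a + 1) 0 (by omega) (by omega)]
    rw [pv_count_seg_nonneg string.toList 0 (string.toList.length : Int) _ (le_refl 0) (le_refl _)]
    simp only [Int.toNat_zero, List.drop_zero, Int.sub_zero, Int.toNat_natCast, List.take_length]
    have harr : (string.toList.length : Int) + (a + 1) = (string.toList.length : Int) + a + 1 := by ring
    rw [harr]
    by_cases hsum :
        ((string.toList.drop ((string.toList.length : Int) + a + 1).toNat).countP
          (fun c => decide ('0' ≤ c) && decide (c ≤ '9')) : Int)
        + (string.toList.countP (fun c => decide ('0' ≤ c) && decide (c ≤ '9')) : Int)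
        = (string.toList.length : Int) - 1
    · rw [if_neg (by omega), if_pos ⟨hdash, hsum⟩]
    · rw [if_pos (by omega), if_neg (by exact fun h => hsum h.2)]
  · rw [if_pos hdash]
    rw [if_neg (fun h => hdash h.1)]

theorem pv_eq_nonneg (a b : Int) (string : String)
    (hsz : a + b + 1 = (string.toList.length : Int)) (ha : 0 ≤ a)
    (hlt : a < (string.toList.length : Int)) :
    check a b string = check_alt a b string := by
  have hb : 0 ≤ b := by omega
  have hat : (a.toNat : Int) = a := Int.toNat_of_nonneg ha
  have hatl : a.toNat < string.toList.length := by omega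
  have ha1 : (a + 1).toNat = a.toNat + 1 := by omega
  simp only [check, check_alt]
  rw [hsz, if_neg (by simp), if_neg (by omega : ¬(a < 0 ∨ b < 0))]
  rw [pv_getD_nonneg string.toList ' ' a ha (by exact_mod_cast hlt)]
  rw [pv_count_seg_nonneg string.toList 0 a _ (le_refl 0) (by omega)]
  rw [pv_count_seg_nonneg string.toList (a + 1) (string.toList.length : Int) _ (by omega) (le_refl _)]
  simp only [Int.toNat_zero, List.drop_zero, Int.sub_zero, ha1]
  have hidx : ((string.toList.length : Int) - (a + 1)).toNat = string.toList.length - (a.toNat + 1) := by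
    omega
  rw [hidx, List.take_of_length_le (le_of_eq List.length_drop)]
  have hgetD : string.toList.getD a.toNat ' ' = string.toList[a.toNat] := by
    simp [List.getD_eq_getElem?_getD, List.getElem?_eq_getElem hatl]
  have hlen_take : (string.toList.take a.toNat).length = a.toNat := by rw [List.length_take]; omega
  have hlen_drop : (string.toList.drop (a.toNat + 1)).length = string.toList.length - (a.toNat + 1) :=
    List.length_drop
  rw [show ((fun c => decide ('0' ≤ c) && decide (c ≤ '9'))) = reClassDigit from rfl]
  by_cases hm : reFullmatchPattern a.toNat b.toNat string.toList = true
  · obtain ⟨hl, htake, hdashE, hdrop⟩ := (pv_fullmatch_iff a.toNat b.toNat string.toList).mp hm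
    have hdashv : string.toList[a.toNat] = '-' := by
      have := List.getElem?_eq_getElem hatl
      rw [this] at hdashE
      exact Option.some.inj hdashE
    rw [hm]
    rw [if_neg (not_not_intro (by rw [hgetD, hdashv]))]
    have hc1 : (string.toList.take a.toNat).countP reClassDigit = (string.toList.take a.toNat).length :=
      List.countP_eq_length.mpr (List.all_eq_true.mp htake)
    have hc2 : (string.toList.drop (a.toNat + 1)).countP reClassDigit = (string.toList.drop (a.toNat + 1)).length :=
      List.countP_eq_length.mpr (List.all_eq_true.mp hdrop)
    rw [hc1, hc2, hlen_take, hlen_drop]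
    rw [if_neg (by omega)]
    simp
  · rw [Bool.not_eq_true] at hm
    rw [hm]
    simp only [Bool.false_eq_true, if_false]
    by_cases hdashv : string.toList[a.toNat] = '-'
    · rw [if_neg (not_not_intro (by rw [hgetD, hdashv]))]
      have hnall : ¬((string.toList.take a.toNat).all reClassDigit = true ∧
          (string.toList.drop (a.toNat + 1)).all reClassDigit = true) := by
        intro ⟨h1, h2⟩
        have : reFullmatchPattern a.toNat b.toNat string.toList = true := by
          rw [pv_fullmatch_iff]
          exact ⟨by omega, h1, by rw [List.getElem?_eq_getElem hatl, hdashv], h2⟩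
        rw [hm] at this
        simp at this
      have hle1 : (string.toList.take a.toNat).countP reClassDigit
          ≤ (string.toList.take a.toNat).length := List.countP_le_length
      have hle2 : (string.toList.drop (a.toNat + 1)).countP reClassDigit
          ≤ (string.toList.drop (a.toNat + 1)).length := List.countP_le_length
      have hstrict : (string.toList.take a.toNat).countP reClassDigit
          + (string.toList.drop (a.toNat + 1)).countP reClassDigit
          < a.toNat + (string.toList.length - (a.toNat + 1)) := by
        rcases Decidable.not_and_iff_not_or_not.mp hnall with h | h
        · have : (string.toList.take a.toNat).countP reClassDigit
              ≠ (string.toList.take a.toNat).length := by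
            intro hc
            exact h (List.all_eq_true.mpr (List.countP_eq_length.mp hc))
          omega
        · have : (string.toList.drop (a.toNat + 1)).countP reClassDigit
              ≠ (string.toList.drop (a.toNat + 1)).length := by
            intro hc
            exact h (List.all_eq_true.mpr (List.countP_eq_length.mp hc))
          omega
      rw [if_pos (by omega)]
    · rw [if_pos (by rw [hgetD]; exact hdashv)]

-- ===== VERDICT (by name: the statement is the Claim_ definition above) =====
theorem check_spec : Claim_unchanged_check := by
  intro a b string _ hpre
  unfold Spec_check
  intro hnd
  unfold Pre_check at hpre
  by_cases hsz : a + b + 1 = (string.toList.length : Int)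
  · obtain ⟨hge, hlt⟩ := hpre hsz
    by_cases ha : 0 ≤ a
    · exact pv_eq_nonneg a b string hsz ha hlt
    · push_neg at ha
      rw [pv_check_neg_eval a b string hsz ha hge]
      have hB : check_alt a b string = "No" := by
        simp only [check_alt]
        rw [if_pos (Or.inl ha)]
      rw [hB]
      rw [if_neg ?hcond]
      case hcond =>
        intro ⟨hdash, hsum⟩
        apply hnd
        unfold D_check
        have hkl : ((string.toList.length : Int) + a).toNat < string.toList.length := by omega
        refine ⟨ha, hsz, ?_, ?_⟩
        · rw [pv_pyGet_neg_eq string.toList a hge ha, List.getElem?_eq_getElem hkl]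
          rw [List.getD_eq_getElem?_getD, List.getElem?_eq_getElem hkl] at hdash
          simp only [Option.getD_some] at hdash
          rw [hdash]
        · simp only [pvDigitCount, pv_isDigit_eq]
          omega
  · have hA : check a b string = "No" := by
      simp only [check]
      rw [if_pos hsz]
    rw [hA]
    by_cases hab : a < 0 ∨ b < 0
    · simp only [check_alt]
      rw [if_pos hab]
    · simp only [check_alt]
      rw [if_neg hab]
      push_neg at hab
      have hm : reFullmatchPattern a.toNat b.toNat string.toList ≠ true := by
        intro h
        obtain ⟨hl, -, -, -⟩ := (pv_fullmatch_iff a.toNat b.toNat string.toList).mp h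
        omega
      rw [if_neg hm]

theorem check_changed : Claim_changed_check := by
  unfold Claim_changed_check; decide

theorem check_tight : Claim_exact_check := by
  intro a b string _ _ hd
  obtain ⟨ha, hsz, hdashP, hsum⟩ := hd
  have hge : -(string.toList.length : Int) ≤ a := (pv_inrange string.toList a hdashP).1
  simp only [pvDigitCount, pv_isDigit_eq] at hsum
  have hB : check_alt a b string = "No" := by
    simp only [check_alt]
    rw [if_pos (Or.inl ha)]
  have hkl : ((string.toList.length : Int) + a).toNat < string.toList.length := by omega
  have hA : check a b string = "Yes" := by
    rw [pv_check_neg_eval a b string hsz ha hge]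
    rw [if_pos ?hc]
    case hc =>
      constructor
      · rw [pv_pyGet_neg_eq string.toList a hge ha, List.getElem?_eq_getElem hkl] at hdashP
        rw [List.getD_eq_getElem?_getD, List.getElem?_eq_getElem hkl]
        simpa using hdashP
      · omega
  rw [hA, hB]
  decide
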